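-- pv_equiv track=rewrite | github.com/chenyusiyuan/game_skill | data_analysis/scripts/extract_gameplay_data.py | lexicon_matches
-- ===== SOURCE A (Python) =====
-- def lexicon_matches(query, lexicon):
--     query_text = "" if query is None else str(query)
--     query_lower = query_text.lower()
--     matches = []
--     for word in lexicon:
--         if word.lower() in query_lower:
--             matches.append(word)
--     return matches
-- ===== SOURCE B (Python) =====
-- def lexicon_matches(query, lexicon):
--     query_text = "" if query is None else str(query)
--     query_lower = query_text.lower()
--     n = len(query_lower)
--     lengths = {len(w.lower()) for w in lexicon}
--     subs = {query_lower[i:i + l] for l in lengths for i in range(0, n + 1)}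
--     return [w for w in lexicon if w.lower() in subs]
-- ===== Notes on version B (the rewrite author's own statement) =====
-- stated objective: faster
-- what changed: Instead of scanning the query once per lexicon word, B precomputes once the set of all query substrings whose lengths occur in the lexicon and then filters the lexicon with one hash-set lookup per word.
import Mathlib
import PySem

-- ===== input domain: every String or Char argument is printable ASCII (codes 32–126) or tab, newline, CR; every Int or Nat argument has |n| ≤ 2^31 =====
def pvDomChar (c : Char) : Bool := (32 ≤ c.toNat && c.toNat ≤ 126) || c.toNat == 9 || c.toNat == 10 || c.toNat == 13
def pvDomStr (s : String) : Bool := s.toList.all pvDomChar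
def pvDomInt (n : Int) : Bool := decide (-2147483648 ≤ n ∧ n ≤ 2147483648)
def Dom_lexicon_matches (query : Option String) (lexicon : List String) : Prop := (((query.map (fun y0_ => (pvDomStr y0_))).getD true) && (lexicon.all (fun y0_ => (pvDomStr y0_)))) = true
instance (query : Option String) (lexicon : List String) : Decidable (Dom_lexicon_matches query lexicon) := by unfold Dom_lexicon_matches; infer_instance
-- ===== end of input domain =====

-- B precomputes the set of all query substrings whose length occurs in the lexicon, then
-- filters the lexicon by one set lookup per word (alternative algorithm, same results).

-- ===== PORT A =====
def lexicon_matches (query : Option String) (lexicon : List String) : List String :=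
  let query_text := match query with | none => "" | some s => s
  let query_lower := PySem.Str.lower query_text
  lexicon.foldl (fun acc word =>
    if PySem.Str.isIn (PySem.Str.lower word) query_lower then acc ++ [word] else acc) []

-- ===== PORT B =====
def lexicon_matches_alt (query : Option String) (lexicon : List String) : List String :=
  let query_text := match query with | none => "" | some s => s
  let query_lower := PySem.Str.lower query_text
  let n : Int := PySem.Str.len query_lower
  let lengths : PySem.Set Int :=
    PySem.Set.ofList (lexicon.map (fun w => PySem.Str.len (PySem.Str.lower w)))
  let subs : PySem.Set String :=
    PySem.Set.ofList (lengths.flatMap (fun l =>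
      (PySem.List.pyRange 0 (n + 1) 1).map (fun i =>
        PySem.Str.slice query_lower (some i) (some (i + l)))))
  lexicon.filter (fun w => PySem.Set.contains subs (PySem.Str.lower w))

-- ===== PRECONDITION & SPEC =====
def Spec_lexicon_matches (query : Option String) (lexicon : List String) (out : List String) : Prop := out = lexicon_matches_alt query lexicon
instance (query : Option String) (lexicon : List String) (out : List String) : Decidable (Spec_lexicon_matches query lexicon out) := by unfold Spec_lexicon_matches; infer_instance

-- ===== CLAIM (what is proved, stated in full; the proofs are below) =====
def Claim_equal_lexicon_matches : Prop := ∀ (query : Option String) (lexicon : List String), Dom_lexicon_matches query lexicon → Spec_lexicon_matches query lexicon (lexicon_matches query lexicon)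

-- ===== LEMMAS AND PROOFS =====

-- membership in B's substring set ↔ the word's lowercase form is a substring of the query
theorem pv_contains_iff (q : String) (lexicon : List String) (w : String) (hw : w ∈ lexicon) :
    PySem.Set.contains
      (PySem.Set.ofList ((PySem.Set.ofList (lexicon.map (fun w => PySem.Str.len (PySem.Str.lower w)))).flatMap (fun l =>
        (PySem.List.pyRange 0 (PySem.Str.len q + 1) 1).map (fun i =>
          PySem.Str.slice q (some i) (some (i + l))))))
      (PySem.Str.lower w)
    = PySem.Str.isIn (PySem.Str.lower w) q := by
  have hq : PySem.Str.len q = (q.toList.length : Int) := by simp [PySem.Str.len_eq]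
  rw [Bool.eq_iff_iff, PySem.Set.contains_iff, PySem.Set.mem_ofList, PySem.Str.isIn_eq,
    PySem.Chars.isIn_iff_infix, List.mem_flatMap]
  constructor
  · rintro ⟨l, hl, hx⟩
    rw [List.mem_map] at hx
    obtain ⟨i, hi, hx⟩ := hx
    rw [PySem.List.mem_pyRange_one] at hi
    have hl0 : 0 ≤ l := by
      rw [PySem.Set.mem_ofList, List.mem_map] at hl
      obtain ⟨w', _, rfl⟩ := hl
      simp [PySem.Str.len_eq]
    have hx' := congrArg String.toList hx
    rw [PySem.Str.toList_slice, PySem.Chars.slice_eq_listSlice, PySem.List.slice_toNat] at hx'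
    rw [← hx']
    exact ((List.take_prefix _ _).isInfix).trans ((List.drop_suffix _ _).isInfix)
    · exact hi.1
    · omega
  · rintro ⟨s, t, hst⟩
    refine ⟨PySem.Str.len (PySem.Str.lower w), ?_, ?_⟩
    · rw [PySem.Set.mem_ofList, List.mem_map]
      exact ⟨w, hw, rfl⟩
    · rw [List.mem_map]
      have hlen : PySem.Str.len (PySem.Str.lower w) = (((PySem.Str.lower w).toList.length : Nat) : Int) := by
        simp [PySem.Str.len_eq]
      refine ⟨((s.length : Nat) : Int), ?_, ?_⟩
      · rw [PySem.List.mem_pyRange_one, hq]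
        have : q.toList.length = s.length + (PySem.Str.lower w).toList.length + t.length := by
          rw [← hst]; simp; omega
        omega
      · apply String.toList_inj.mp
        rw [PySem.Str.toList_slice, PySem.Chars.slice_eq_listSlice, hlen, PySem.List.slice_natCast_add, ← hst]
        rw [List.append_assoc, List.drop_left, List.take_left]

-- ===== VERDICT (by name: the statement is the Claim_ definition above) =====
theorem lexicon_matches_spec : Claim_equal_lexicon_matches := by
  intro query lexicon _
  unfold Spec_lexicon_matches lexicon_matches lexicon_matches_alt
  simp only
  rw [PySem.List.foldl_append_if_eq_filter]
  rw [List.filter_congr (fun w hw => (pv_contains_iff _ lexicon w hw).symm)]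
  simp
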